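-- pv_equiv track=rewrite | github.com/Paradox-85/jackdaw_edw | etl/tasks/crs_tier3_llm_classifier.py | _build_categories_line
-- ===== SOURCE A (Python) =====
-- from typing import Any
--
-- def _build_categories_line(
--     templates: list[dict[str, Any]],
--     domain: str | None = None,
--     max_chars: int = 10000,
-- ) -> str:
--     """Build compact category hints string for LLM prompt injection.
--
--     Filters templates by check_type substring match against domain.
--     Falls back to all templates if filtered list is empty or domain is None.
--
--     Format per entry: "CRS-C001=tag not in register"
--     """
--     if not templates:
--         return ""
--
--     filtered = templates
--     if domain:
--         filtered = [
--             t for t in templates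
--             if t.get("check_type") and domain.lower() in t["check_type"].lower()
--         ]
--         if not filtered:
--             filtered = templates  # fallback to all
--
--     parts: list[str] = []
--     current_len = 0
--     for t in filtered:
--         cat = t.get("category") or "?"
--         short = t.get("short_template_text")
--         entry = f"{cat}={short[:40]}" if short else f"{cat}={t.get('check_type') or ''}"
--         separator_len = 2 if parts else 0  # ", " between entries
--         if current_len + separator_len + len(entry) > max_chars:
--             break
--         parts.append(entry)
--         current_len += separator_len + len(entry)
--
--     return ", ".join(parts)
-- ===== SOURCE B (Python) =====
-- def _build_categories_line(templates, domain=None, max_chars=10000):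
--     pool = templates
--     if domain:
--         low = domain.lower()
--         pool = [t for t in templates
--                 if low in (t.get("check_type") or "").lower()] or templates
--
--     def fmt(t):
--         cat = t.get("category") or "?"
--         s = t.get("short_template_text")
--         return cat + "=" + (s[:40] if s else (t.get("check_type") or ""))
--
--     def fit(es, budget):
--         if not es or len(es[0]) > budget:
--             return []
--         return [es[0]] + fit(es[1:], budget - len(es[0]) - 2)
--
--     return ", ".join(fit([fmt(t) for t in pool], max_chars))
-- ===== Notes on version B (the rewrite author's own statement) =====
-- stated objective: alternative
-- what changed: Replaces A's greedy pack loop carrying (parts, current_len) with conditional separator accounting by a staged pipeline: simplify the filter predicate to a single substring test, format all entries first, then select the fitting prefix by a budget-decrementing recursion (each step subtracts len(entry)+2 from the remaining budget).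
import Mathlib
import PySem

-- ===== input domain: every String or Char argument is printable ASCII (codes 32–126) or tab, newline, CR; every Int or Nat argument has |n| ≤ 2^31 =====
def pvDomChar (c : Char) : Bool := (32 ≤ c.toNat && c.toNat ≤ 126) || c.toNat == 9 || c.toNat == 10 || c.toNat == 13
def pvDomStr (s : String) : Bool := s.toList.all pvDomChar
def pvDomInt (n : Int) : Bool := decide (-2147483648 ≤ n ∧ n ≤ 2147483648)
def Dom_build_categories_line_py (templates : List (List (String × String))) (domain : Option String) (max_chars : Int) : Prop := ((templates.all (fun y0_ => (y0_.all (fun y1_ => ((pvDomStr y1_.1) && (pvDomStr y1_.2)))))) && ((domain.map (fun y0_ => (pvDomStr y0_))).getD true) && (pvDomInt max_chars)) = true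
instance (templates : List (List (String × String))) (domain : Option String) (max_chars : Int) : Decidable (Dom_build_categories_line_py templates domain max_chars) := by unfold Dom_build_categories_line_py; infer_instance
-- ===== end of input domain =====

-- B replaces A's greedy pack loop (parts, current_len, conditional separator) with a staged
-- pipeline: simplified filter, format all entries, then pick the fitting prefix by a
-- budget-decrementing recursion; alternative decomposition, same cost.

-- ===== PORT A =====
-- t.get(k) or "" (missing key and empty value are both falsy)
def pvGetA (t : List (String × String)) (k : String) : String :=
  ((PySem.Dict.mk t).get? k).getD ""

-- entry = f"{cat}={short[:40]}" if short else f"{cat}={check_type or ''}"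
def pvEntryA (t : List (String × String)) : String :=
  let cat0 := pvGetA t "category"
  let cat := if cat0 = "" then "?" else cat0
  let short := pvGetA t "short_template_text"
  if short ≠ "" then cat ++ "=" ++ PySem.Str.slice short none (some 40)
  else cat ++ "=" ++ pvGetA t "check_type"

-- the filtered list: filter by check_type truthiness + substring match, fallback to all
def pvFilteredA (templates : List (List (String × String))) (domain : Option String) : List (List (String × String)) :=
  match domain with
  | some d =>
      if d ≠ "" then
        let f := templates.filter (fun t =>
          pvGetA t "check_type" ≠ "" &&
          PySem.Str.isIn (PySem.Str.lower d) (PySem.Str.lower (pvGetA t "check_type")))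
        if f.isEmpty then templates else f
      else templates
  | none => templates

-- the 'for t in filtered: … break' loop, carried state (parts, current_len)
def pvLoopA (max_chars : Int) : List (List (String × String)) → List String → Int → List String
  | [], parts, _ => parts
  | t :: rest, parts, cur =>
      let entry := pvEntryA t
      let sep : Int := if parts.isEmpty then 0 else 2
      if max_chars < cur + sep + PySem.Str.len entry then parts
      else pvLoopA max_chars rest (parts ++ [entry]) (cur + sep + PySem.Str.len entry)

def build_categories_line_py (templates : List (List (String × String))) (domain : Option String) (max_chars : Int) : String :=
  if templates.isEmpty then ""
  else PySem.Str.join ", " (pvLoopA max_chars (pvFilteredA templates domain) [] 0)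

-- ===== PORT B =====
-- t.get(k) or "" via a first-match scan of the association list
def pvGetB (t : List (String × String)) (k : String) : String :=
  match t.find? (fun p => p.1 == k) with
  | some p => p.2
  | none => ""

-- fmt: cat + "=" + (s[:40] if s else check_type-or-"")
def pvFmtB (t : List (String × String)) : String :=
  let cat0 := pvGetB t "category"
  (if cat0 = "" then "?" else cat0) ++ "=" ++
    (let s := pvGetB t "short_template_text"
     if s ≠ "" then PySem.Str.slice s none (some 40) else pvGetB t "check_type")

-- pool = [t for t in templates if low in (t.get("check_type") or "").lower()] or templates
def pvPoolB (templates : List (List (String × String))) (domain : Option String) : List (List (String × String)) :=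
  match domain with
  | some d =>
      if d ≠ "" then
        match templates.filter (fun t =>
            PySem.Str.isIn (PySem.Str.lower d) (PySem.Str.lower (pvGetB t "check_type"))) with
        | [] => templates
        | f => f
      else templates
  | none => templates

-- fit: longest prefix under a decrementing budget (len e + 2 consumed per kept entry)
def pvFitB : List String → Int → List String
  | [], _ => []
  | e :: r, budget =>
      if budget < PySem.Str.len e then []
      else e :: pvFitB r (budget - PySem.Str.len e - 2)

def build_categories_line_py_alt (templates : List (List (String × String))) (domain : Option String) (max_chars : Int) : String :=
  PySem.Str.join ", " (pvFitB ((pvPoolB templates domain).map pvFmtB) max_chars)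

-- ===== PRECONDITION & SPEC =====
def Spec_build_categories_line_py (templates : List (List (String × String))) (domain : Option String) (max_chars : Int) (out : String) : Prop := out = build_categories_line_py_alt templates domain max_chars
instance (templates : List (List (String × String))) (domain : Option String) (max_chars : Int) (out : String) : Decidable (Spec_build_categories_line_py templates domain max_chars out) := by unfold Spec_build_categories_line_py; infer_instance

-- ===== CLAIM =====
def Claim_equal_build_categories_line_py : Prop := ∀ (templates : List (List (String × String))) (domain : Option String) (max_chars : Int), Dom_build_categories_line_py templates domain max_chars → Spec_build_categories_line_py templates domain max_chars (build_categories_line_py templates domain max_chars)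

-- ===== LEMMAS AND PROOFS =====

theorem pvGet_eq (t : List (String × String)) (k : String) : pvGetB t k = pvGetA t k := by
  induction t with
  | nil => rfl
  | cons p rest ih =>
      obtain ⟨a, b⟩ := p
      by_cases h : a == k
      · simp [pvGetB, pvGetA, PySem.Dict.get?_mk_cons, h]
      · have hB : pvGetB ((a, b) :: rest) k = pvGetB rest k := by
          simp [pvGetB, h]
        have hA : pvGetA ((a, b) :: rest) k = pvGetA rest k := by
          simp [pvGetA, PySem.Dict.get?_mk_cons, h]
        rw [hB, hA, ih]

theorem pvFmt_eq (t : List (String × String)) : pvFmtB t = pvEntryA t := by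
  simp only [pvFmtB, pvEntryA, pvGet_eq]
  by_cases h : pvGetA t "short_template_text" ≠ "" <;> simp [h]

-- a truthy domain never matches inside an empty check_type
theorem pvIsIn_empty (d : String) (h : d ≠ "") : PySem.Str.isIn (PySem.Str.lower d) "" = false := by
  rw [← Bool.not_eq_true, PySem.Str.isIn_iff_infix]
  intro h2
  rw [show ("" : String).toList = [] from rfl, List.infix_nil, PySem.Str.toList_lower] at h2
  simp [PySem.Chars.lower] at h2
  exact h (by cases d; simp_all)

theorem pvPool_eq (templates : List (List (String × String))) (domain : Option String) :
    pvPoolB templates domain = pvFilteredA templates domain := by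
  cases domain with
  | none => rfl
  | some d =>
      simp only [pvPoolB, pvFilteredA]
      by_cases hd : d ≠ ""
      · rw [if_pos hd, if_pos hd]
        have hf : templates.filter (fun t =>
            PySem.Str.isIn (PySem.Str.lower d) (PySem.Str.lower (pvGetB t "check_type")))
          = templates.filter (fun t =>
            pvGetA t "check_type" ≠ "" &&
            PySem.Str.isIn (PySem.Str.lower d) (PySem.Str.lower (pvGetA t "check_type"))) := by
          apply List.filter_congr
          intro t _
          rw [pvGet_eq]
          by_cases hc : pvGetA t "check_type" = ""
          · have h0 : PySem.Str.lower "" = "" := rfl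
            rw [hc, h0, pvIsIn_empty d hd]
            simp
          · simp [hc]
        rw [hf]
        cases h : templates.filter (fun t =>
            pvGetA t "check_type" ≠ "" &&
            PySem.Str.isIn (PySem.Str.lower d) (PySem.Str.lower (pvGetA t "check_type"))) with
        | nil => simp
        | cons a l => simp
      · simp [hd]

-- the greedy loop with nonempty parts = budgeted-prefix recursion with budget max - cur - 2
theorem pvLoop_ne (max_chars : Int) (ts : List (List (String × String))) :
    ∀ (parts : List String) (cur : Int), parts ≠ [] →
    pvLoopA max_chars ts parts cur = parts ++ pvFitB (ts.map pvEntryA) (max_chars - cur - 2) := by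
  induction ts with
  | nil => intro parts cur _; simp [pvLoopA, pvFitB]
  | cons t r ih =>
      intro parts cur hne
      have hsep : parts.isEmpty = false := by
        cases parts with
        | nil => exact absurd rfl hne
        | cons _ _ => rfl
      simp only [pvLoopA, List.map_cons, pvFitB, hsep, Bool.false_eq_true, if_false]
      by_cases hbig : max_chars < cur + 2 + PySem.Str.len (pvEntryA t)
      · rw [if_pos hbig, if_pos (by omega)]
        simp
      · rw [if_neg hbig, if_neg (by omega)]
        rw [ih (parts ++ [pvEntryA t]) _ (by simp)]
        have he : max_chars - (cur + 2 + PySem.Str.len (pvEntryA t)) - 2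
            = max_chars - cur - 2 - PySem.Str.len (pvEntryA t) - 2 := by ring
        simp only [PySem.Str.len_eq] at he ⊢
        rw [he]
        simp

-- the greedy loop from the empty state = budgeted-prefix recursion with full budget
theorem pvLoop_start (max_chars : Int) (ts : List (List (String × String))) :
    pvLoopA max_chars ts [] 0 = pvFitB (ts.map pvEntryA) max_chars := by
  cases ts with
  | nil => rfl
  | cons t r =>
      simp only [pvLoopA, List.map_cons, pvFitB, List.isEmpty_nil, if_true]
      by_cases hbig : max_chars < 0 + 0 + PySem.Str.len (pvEntryA t)
      · rw [if_pos hbig, if_pos (by omega)]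
      · rw [if_neg hbig, if_neg (by omega)]
        rw [pvLoop_ne max_chars r ([] ++ [pvEntryA t]) _ (by simp)]
        have he : max_chars - (0 + 0 + PySem.Str.len (pvEntryA t)) - 2
            = max_chars - PySem.Str.len (pvEntryA t) - 2 := by ring
        simp only [PySem.Str.len_eq] at he ⊢
        rw [he]
        simp

theorem pvFilteredA_nil (domain : Option String) : pvFilteredA [] domain = [] := by
  cases domain with
  | none => rfl
  | some d => simp [pvFilteredA]

-- ===== VERDICT =====
theorem build_categories_line_py_spec : Claim_equal_build_categories_line_py := by
  intro templates domain max_chars _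
  unfold Spec_build_categories_line_py build_categories_line_py build_categories_line_py_alt
  rw [pvPool_eq]
  have hmap : (pvFilteredA templates domain).map pvFmtB = (pvFilteredA templates domain).map pvEntryA :=
    List.map_congr_left (fun t _ => pvFmt_eq t)
  rw [hmap]
  by_cases hemp : templates.isEmpty
  · have h0 : templates = [] := by simpa [List.isEmpty_iff] using hemp
    subst h0
    rw [if_pos hemp, pvFilteredA_nil]
    rfl
  · rw [if_neg hemp, pvLoop_start]
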